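-- pv_equiv track=rewrite | github.com/dmah10/EvalxNLP | dataset_loaders/hatexplain.py | process_rationales
-- ===== SOURCE A (Python) =====
-- def process_rationales(rationales):
--     """
--     Return the rationales as-is or apply any necessary processing.
--
--     Returns:
--         list of list of float: Processed rationales.
--     """
--     processed_rationales = []
--     for rationale in rationales:
--         if len(rationale) > 0:
--             # Compute the union of the current rationale
--             union = [any(each) for each in zip(*rationale)]
--             union = [int(each) for each in union]
--             processed_rationales.append(union)
--         else:
--             # If the rationale is empty, append it as-is
--             processed_rationales.append(rationale)
--     return processed_rationales
-- ===== SOURCE B (Python) =====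
-- def process_rationales(rationales):
--     out = []
--     for rationale in rationales:
--         if len(rationale) == 0:
--             out.append(rationale)
--         else:
--             union = [1 if x else 0 for x in rationale[0]]
--             for row in rationale[1:]:
--                 union = [1 if x else u for u, x in zip(union, row)]
--             out.append(union)
--     return out
-- ===== Notes on version B (the rewrite author's own statement) =====
-- stated objective: alternative
-- what changed: Replaces the column-wise transpose (zip(*rationale)) plus any() per column by a single row-major pass that ORs each row into a running 0/1 union list (zip with the accumulator reproduces the shortest-row truncation).
import Mathlib
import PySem

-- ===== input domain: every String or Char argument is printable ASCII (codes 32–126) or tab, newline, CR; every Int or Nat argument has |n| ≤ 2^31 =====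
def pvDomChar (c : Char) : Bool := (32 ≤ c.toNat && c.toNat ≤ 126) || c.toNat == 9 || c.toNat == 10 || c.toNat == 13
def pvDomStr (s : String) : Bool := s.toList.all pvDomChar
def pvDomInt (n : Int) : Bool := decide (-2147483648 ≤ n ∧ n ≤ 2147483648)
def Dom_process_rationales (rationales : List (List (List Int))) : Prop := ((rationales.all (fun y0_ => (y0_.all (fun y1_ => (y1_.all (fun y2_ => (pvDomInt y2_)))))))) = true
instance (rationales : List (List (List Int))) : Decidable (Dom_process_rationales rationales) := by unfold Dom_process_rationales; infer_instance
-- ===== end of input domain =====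

-- B replaces A's column-wise transpose (zip(*rationale) + any per column) by a row-major
-- pass that ORs each row into a running 0/1 accumulator; alternative decomposition, not faster.

-- ===== PORT A =====
-- helper for the termination proof of pyZipStar (cited by name in decreasing_by)
theorem pv_tails_len_sum_le (l : List (List Int)) :
    ((l.map List.tail).map List.length).sum ≤ (l.map List.length).sum := by
  induction l with
  | nil => simp
  | cons a t ih =>
    simp only [List.map_cons, List.sum_cons]
    have : a.tail.length ≤ a.length := by
      cases a <;> simp
    omega

-- hand port of Python's zip(*rows): columns of the heads, truncated at the shortest row
-- (exact: zip stops as soon as some iterator is exhausted; zip() of zero lists is empty)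
def pyZipStar : List (List Int) → List (List Int)
  | [] => []
  | r :: rs =>
    if (r :: rs).any (fun l => l.isEmpty) then []
    else ((r :: rs).map (fun l => l.headD 0)) :: pyZipStar ((r :: rs).map List.tail)
termination_by rows => (rows.map List.length).sum
decreasing_by
  rename_i h
  simp only [List.any_cons, Bool.or_eq_true, List.isEmpty_iff, not_or] at h
  simp only [List.map_cons, List.sum_cons]
  have h1 : r.tail.length < r.length := by
    cases r with
    | nil => exact absurd rfl h.1
    | cons a t => simp
  have h2 := pv_tails_len_sum_le rs
  omega

def process_rationales (rationales : List (List (List Int))) : List (List Int) :=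
  rationales.map (fun rationale =>
    if rationale.length > 0 then
      -- union = [any(each) for each in zip(*rationale)]; union = [int(each) for each in union]
      ((pyZipStar rationale).map (fun each => each.any (fun x => decide (x ≠ 0)))).map
        (fun each => if each then (1 : Int) else 0)
    else
      -- rationale is empty here, appended as-is (an empty list)
      [])

-- ===== PORT B =====
def process_rationales_alt (rationales : List (List (List Int))) : List (List Int) :=
  rationales.map (fun rationale =>
    match rationale with
    | [] => []
    | f :: rest =>
      rest.foldl
        (fun u row => List.zipWith (fun a x => if x ≠ 0 then (1 : Int) else a) u row)
        (f.map (fun x => if x ≠ 0 then (1 : Int) else 0)))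

-- ===== PRECONDITION & SPEC =====
def Spec_process_rationales (rationales : List (List (List Int))) (out : List (List Int)) : Prop := out = process_rationales_alt rationales
instance (rationales : List (List (List Int))) (out : List (List Int)) : Decidable (Spec_process_rationales rationales out) := by unfold Spec_process_rationales; infer_instance

-- ===== CLAIM (what is proved, stated in full; the proofs are below) =====
def Claim_equal_process_rationales : Prop := ∀ (rationales : List (List (List Int))), Dom_process_rationales rationales → Spec_process_rationales rationales (process_rationales rationales)

-- ===== LEMMAS AND PROOFS =====
-- ==== min-length lemmas ====

theorem pv_foldl_min_le_init (rest : List (List Int)) (a : Nat) :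
    rest.foldl (fun m r => min m r.length) a ≤ a := by
  induction rest generalizing a with
  | nil => simp
  | cons r t ih => exact le_trans (ih _) (by simp)

theorem pv_foldl_min_le_mem (rest : List (List Int)) (a : Nat) (r : List Int) (h : r ∈ rest) :
    rest.foldl (fun m r => min m r.length) a ≤ r.length := by
  induction rest generalizing a with
  | nil => simp at h
  | cons x t ih =>
    rcases List.mem_cons.mp h with h1 | h2
    · subst h1
      simp only [List.foldl_cons]
      exact le_trans (pv_foldl_min_le_init _ _) (min_le_right _ _)
    · exact ih _ h2

theorem pv_foldl_min_pos (rest : List (List Int)) (a : Nat) (ha : 0 < a)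
    (h : ∀ r ∈ rest, r ≠ []) : 0 < rest.foldl (fun m r => min m r.length) a := by
  induction rest generalizing a with
  | nil => simpa
  | cons x t ih =>
    have hx : x ≠ [] := h x (by simp)
    have : 0 < min a x.length := by
      have : 0 < x.length := List.length_pos_iff.mpr hx
      omega
    exact ih _ this (fun r hr => h r (by simp [hr]))

theorem pv_foldl_min_tail (rest : List (List Int)) (a : Nat) :
    (rest.map List.tail).foldl (fun m r => min m r.length) (a - 1)
      = rest.foldl (fun m r => min m r.length) a - 1 := by
  induction rest generalizing a with
  | nil => simp
  | cons x t ih =>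
    simp only [List.map_cons, List.foldl_cons]
    have hx : x.tail.length = x.length - 1 := by cases x <;> simp
    rw [hx, show min (a-1) (x.length - 1) = min a x.length - 1 by omega, ih]

theorem pv_getD_zero (l : List Int) : l.getD 0 0 = l.headD 0 := by cases l <;> rfl

theorem pv_getD_tail (l : List Int) (j : Nat) : l.tail.getD j 0 = l.getD (j+1) 0 := by
  cases l <;> simp

-- ==== characterisation of pyZipStar ====
theorem pv_zipStar_eq (L : Nat) : ∀ (f : List Int) (rest : List (List Int)),
    rest.foldl (fun m r => min m r.length) f.length = L →
    pyZipStar (f :: rest) = (List.range L).map (fun j => (f :: rest).map (fun r => r.getD j 0)) := by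
  induction L with
  | zero =>
    intro f rest hL
    have hempty : (f :: rest).any (fun l => l.isEmpty) = true := by
      by_contra hne
      simp only [List.any_cons, Bool.or_eq_true, List.any_eq_true, List.isEmpty_iff, not_or,
        not_exists, not_and] at hne
      have h0 : 0 < rest.foldl (fun m r => min m r.length) f.length := by
        apply pv_foldl_min_pos
        · exact List.length_pos_iff.mpr hne.1
        · intro r hr
          rcases hne with ⟨_, h2⟩
          exact h2 r hr
      omega
    rw [pyZipStar, if_pos hempty]
    simp
  | succ n ih =>
    intro f rest hL
    have hnoempty : ¬ (f :: rest).any (fun l => l.isEmpty) = true := by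
      simp only [List.any_cons, Bool.or_eq_true, List.any_eq_true, List.isEmpty_iff, not_or,
        not_exists, not_and]
      constructor
      · intro hf
        rw [hf] at hL
        have h := pv_foldl_min_le_init rest ([] : List Int).length
        simp only [List.length_nil] at h hL
        omega
      · intro r hr hre
        have h := pv_foldl_min_le_mem rest f.length r hr
        rw [hre] at h
        simp only [List.length_nil, Nat.le_zero] at h
        omega
    rw [pyZipStar, if_neg hnoempty]
    have htail : (rest.map List.tail).foldl (fun m r => min m r.length) f.tail.length = n := by
      have hf : f.tail.length = f.length - 1 := by cases f <;> simp
      rw [hf, pv_foldl_min_tail, hL]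
      omega
    have hrec := ih f.tail (rest.map List.tail) htail
    simp only [List.map_cons] at hrec ⊢
    rw [hrec, List.range_succ_eq_map]
    simp only [List.map_cons, List.map_map]
    congr 1
    · rw [pv_getD_zero]
      exact congrArg _ (List.map_congr_left (fun r _ => (pv_getD_zero r).symm))
    · apply List.map_congr_left
      intro j _
      rw [show ((fun j => f.getD j 0 :: rest.map (fun r => r.getD j 0)) ∘ Nat.succ) j
            = f.getD (j+1) 0 :: rest.map (fun r => r.getD (j+1) 0) from rfl,
          ← pv_getD_tail]
      exact congrArg _ (List.map_congr_left (fun r _ => pv_getD_tail r j))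

-- ==== B-side lemmas ====
theorem pv_bit_zipWith (u r : List Int) (hu : ∀ v ∈ u, v = 0 ∨ v = 1) :
    ∀ v ∈ List.zipWith (fun a x => if x ≠ 0 then (1 : Int) else a) u r, v = 0 ∨ v = 1 := by
  induction u generalizing r with
  | nil => simp
  | cons a t ih =>
    cases r with
    | nil => simp
    | cons x rt =>
      intro v hv
      simp only [List.zipWith_cons_cons, List.mem_cons] at hv
      rcases hv with h | h
      · subst h
        split
        · exact Or.inr rfl
        · exact hu a (by simp)
      · exact ih rt (fun v hv => hu v (by simp [hv])) v h

theorem pv_getD_zipWith (u r : List Int) (j : Nat) (hju : j < u.length) (hjr : j < r.length) :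
    (List.zipWith (fun a x => if x ≠ 0 then (1 : Int) else a) u r).getD j 0
      = (fun a x => if x ≠ 0 then (1 : Int) else a) (u.getD j 0) (r.getD j 0) := by
  have hlen : j < (List.zipWith (fun a x => if x ≠ 0 then (1 : Int) else a) u r).length := by
    simp [List.length_zipWith]; omega
  rw [List.getD_eq_getElem _ _ hlen, List.getD_eq_getElem _ _ hju, List.getD_eq_getElem _ _ hjr,
    List.getElem_zipWith]

theorem pv_bit_range (u : List Int) (hu : ∀ v ∈ u, v = 0 ∨ v = 1) :
    (List.range u.length).map (fun j => if u.getD j 0 ≠ 0 then (1 : Int) else 0) = u := by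
  induction u with
  | nil => simp
  | cons a t ih =>
    rw [List.length_cons, List.range_succ_eq_map, List.map_cons, List.map_map]
    congr 1
    · rcases hu a (by simp) with h | h <;> simp [h]
    · rw [show ((fun j => if (a :: t).getD j 0 ≠ 0 then (1 : Int) else 0) ∘ Nat.succ)
            = (fun j => if t.getD j 0 ≠ 0 then (1 : Int) else 0) from rfl]
      exact ih (fun v hv => hu v (by simp [hv]))

theorem pv_foldl_B (rest : List (List Int)) : ∀ (u : List Int), (∀ v ∈ u, v = 0 ∨ v = 1) →
    rest.foldl (fun u row => List.zipWith (fun a x => if x ≠ 0 then (1 : Int) else a) u row) u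
      = (List.range (rest.foldl (fun m r => min m r.length) u.length)).map
          (fun j => if (decide (u.getD j 0 ≠ 0) || rest.any (fun r => decide (r.getD j 0 ≠ 0)))
                    then (1 : Int) else 0) := by
  induction rest with
  | nil =>
    intro u hu
    simp only [List.foldl_nil, List.any_nil, Bool.or_false]
    conv_lhs => rw [← pv_bit_range u hu]
    apply List.map_congr_left
    intro j _
    by_cases h : u.getD j 0 ≠ 0 <;> simp_all
  | cons r rest' ih =>
    intro u hu
    simp only [List.foldl_cons]
    rw [ih _ (pv_bit_zipWith u r hu)]
    rw [List.length_zipWith]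
    apply List.map_congr_left
    intro j hj
    have hjM : j < rest'.foldl (fun m r => min m r.length) (min u.length r.length) := List.mem_range.mp hj
    have hmin : j < min u.length r.length := lt_of_lt_of_le hjM (pv_foldl_min_le_init _ _)
    rw [pv_getD_zipWith u r j (by omega) (by omega)]
    simp only [List.any_cons, List.getD_eq_getElem?_getD]
    by_cases hr : r[j]?.getD 0 = 0 <;> by_cases hu0 : u[j]?.getD 0 = 0 <;> simp [hr, hu0]

theorem pv_getD_map_bit (f : List Int) (j : Nat) :
    (f.map (fun x => if x ≠ 0 then (1 : Int) else 0)).getD j 0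
      = if f.getD j 0 ≠ 0 then (1 : Int) else 0 := by
  by_cases h : j < f.length
  · rw [List.getD_eq_getElem _ _ (by simpa), List.getD_eq_getElem _ _ h, List.getElem_map]
  · rw [List.getD_eq_default _ _ (by simpa using le_of_not_gt h),
      List.getD_eq_default _ _ (le_of_not_gt h)]
    simp

-- ==== per-rationale agreement and the verdict ====
theorem pv_main (f : List Int) (rest : List (List Int)) :
    ((pyZipStar (f :: rest)).map (fun each => each.any (fun x => decide (x ≠ 0)))).map
        (fun each => if each then (1 : Int) else 0)
      = rest.foldl (fun u row => List.zipWith (fun a x => if x ≠ 0 then (1 : Int) else a) u row)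
          (f.map (fun x => if x ≠ 0 then (1 : Int) else 0)) := by
  rw [pv_zipStar_eq (rest.foldl (fun m r => min m r.length) f.length) f rest rfl]
  rw [pv_foldl_B rest _ (by
    intro v hv
    rw [List.mem_map] at hv
    obtain ⟨x, -, rfl⟩ := hv
    split
    · exact Or.inr rfl
    · exact Or.inl rfl)]
  rw [List.length_map]
  simp only [List.map_map]
  apply List.map_congr_left
  intro j _
  simp only [Function.comp, List.any_map, pv_getD_map_bit, List.any_cons]
  by_cases hf : f.getD j 0 = 0 <;> simp_all

theorem pv_verdict : ∀ (rationales : List (List (List Int))),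
    process_rationales rationales = process_rationales_alt rationales := by
  intro rationales
  unfold process_rationales process_rationales_alt
  apply List.map_congr_left
  intro rationale _
  cases rationale with
  | nil => simp
  | cons f rest =>
    rw [if_pos (by simp)]
    exact pv_main f rest

-- ===== VERDICT (by name: the statement is the Claim_ definition above) =====
theorem process_rationales_spec : Claim_equal_process_rationales := by
  intro rationales _
  exact pv_verdict rationales
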